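-- pv_equiv track=rewrite | github.com/Nytransit212/Voicetranscribe | core/turn_stabilizer.py | _count_label_changes
-- ===== SOURCE A (Python) =====
-- from typing import List, Dict, Any, Optional, Tuple, Union
-- from collections import Counter
--
-- def _count_label_changes(original_segments: List[Dict[str, Any]],
--                         filtered_segments: List[Dict[str, Any]]) -> int:
--     """Count how many speaker labels were changed during filtering"""
--
--     # This is a simplified count - in practice you'd do temporal alignment
--     changes = 0
--
--     # Create a rough mapping by comparing segment counts per speaker
--     orig_speakers = Counter(seg['speaker_id'] for seg in original_segments)
--     filt_speakers = Counter(seg['speaker_id'] for seg in filtered_segments)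
--
--     # Count differences
--     for speaker in set(orig_speakers.keys()) | set(filt_speakers.keys()):
--         changes += abs(orig_speakers.get(speaker, 0) - filt_speakers.get(speaker, 0))
--
--     return changes
-- ===== SOURCE B (Python) =====
-- from typing import List, Dict, Any
--
-- def _count_label_changes(original_segments: List[Dict[str, Any]],
--                         filtered_segments: List[Dict[str, Any]]) -> int:
--     """Count how many speaker labels were changed during filtering"""
--     # Sort both speaker-label lists and count matching labels with a two-pointer
--     # merge; the symmetric-difference size len(a)+len(b)-2*matches is exactly the
--     # sum over speakers of |count difference|.
--     a = sorted(seg['speaker_id'] for seg in original_segments)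
--     b = sorted(seg['speaker_id'] for seg in filtered_segments)
--     i = j = matches = 0
--     while i < len(a) and j < len(b):
--         if a[i] == b[j]:
--             matches += 1
--             i += 1
--             j += 1
--         elif a[i] < b[j]:
--             i += 1
--         else:
--             j += 1
--     return len(a) + len(b) - 2 * matches
-- ===== Notes on version B (the rewrite author's own statement) =====
-- stated objective: alternative
-- what changed: Instead of building two per-speaker Counters and summing |count difference| over the union of keys, B sorts both speaker-label lists and counts matching labels with a two-pointer merge, returning len(a)+len(b)-2*matches (the multiset symmetric-difference size).
import Mathlib
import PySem

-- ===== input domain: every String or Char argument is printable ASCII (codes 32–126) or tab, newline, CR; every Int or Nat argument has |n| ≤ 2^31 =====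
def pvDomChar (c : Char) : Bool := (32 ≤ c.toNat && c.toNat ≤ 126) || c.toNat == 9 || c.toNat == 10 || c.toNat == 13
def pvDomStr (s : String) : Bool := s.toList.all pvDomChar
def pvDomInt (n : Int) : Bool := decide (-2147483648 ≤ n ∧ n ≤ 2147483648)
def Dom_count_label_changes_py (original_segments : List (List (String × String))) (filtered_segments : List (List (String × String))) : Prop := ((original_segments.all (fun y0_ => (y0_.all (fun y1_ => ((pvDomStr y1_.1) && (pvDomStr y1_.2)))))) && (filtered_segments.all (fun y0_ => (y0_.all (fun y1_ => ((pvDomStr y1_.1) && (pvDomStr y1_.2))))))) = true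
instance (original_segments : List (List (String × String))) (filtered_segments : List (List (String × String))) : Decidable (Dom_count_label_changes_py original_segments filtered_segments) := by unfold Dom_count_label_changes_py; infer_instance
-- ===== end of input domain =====

-- B replaces A's two-Counter key-union scan by sorting both speaker-label lists and
-- counting matching labels with a two-pointer merge (objective: alternative, not faster).

-- ===== PORT A =====
-- seg['speaker_id']: exact wherever the key is present (Pre_ requires that); the "" default is never used under Pre_
def pvSid (seg : List (String × String)) : String :=
  ((PySem.Dict.ofList seg).get? "speaker_id").getD ""

def count_label_changes_py (original_segments : List (List (String × String))) (filtered_segments : List (List (String × String))) : Int :=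
  let orig_speakers := PySem.Dict.counter (original_segments.map (fun seg => pvSid seg))
  let filt_speakers := PySem.Dict.counter (filtered_segments.map (fun seg => pvSid seg))
  -- for speaker in set(orig.keys()) | set(filt.keys()): changes += abs(orig.get(speaker,0) - filt.get(speaker,0))
  -- (Python iterates the set in hash order; the sum does not depend on the order)
  (PySem.Set.union (PySem.Set.ofList orig_speakers.keys) (PySem.Set.ofList filt_speakers.keys)).foldl
    (fun changes speaker => changes + |orig_speakers.getD speaker 0 - filt_speakers.getD speaker 0|) 0

-- ===== PORT B =====
-- the two-pointer 'while i < len(a) and j < len(b)' loop of Source B: advancing an index = dropping the head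
def pvMerge : List String → List String → Int
  | [], _ => 0
  | _ :: _, [] => 0
  | x :: xs, y :: ys =>
    if x = y then 1 + pvMerge xs ys
    else if x < y then pvMerge xs (y :: ys)
    else pvMerge (x :: xs) ys
termination_by a b => a.length + b.length

def count_label_changes_py_alt (original_segments : List (List (String × String))) (filtered_segments : List (List (String × String))) : Int :=
  let a := PySem.List.sorted (original_segments.map (fun seg => pvSid seg)) (fun x => x) false
  let b := PySem.List.sorted (filtered_segments.map (fun seg => pvSid seg)) (fun x => x) false
  (a.length : Int) + (b.length : Int) - 2 * pvMerge a b

-- ===== PRECONDITION & SPEC =====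
-- Pre_ excludes exactly the inputs where some segment lacks the 'speaker_id' key, on which A (and B) raise KeyError
def Pre_count_label_changes_py (original_segments : List (List (String × String))) (filtered_segments : List (List (String × String))) : Prop :=
  (original_segments.all (fun seg => (PySem.Dict.ofList seg).contains "speaker_id")
    && filtered_segments.all (fun seg => (PySem.Dict.ofList seg).contains "speaker_id")) = true
instance (original_segments : List (List (String × String))) (filtered_segments : List (List (String × String))) : Decidable (Pre_count_label_changes_py original_segments filtered_segments) := by unfold Pre_count_label_changes_py; infer_instance

def pvWitness_count_label_changes_py : (List (List (String × String))) × (List (List (String × String))) :=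
  ([[("speaker_id", "a")], [("speaker_id", "b")]], [[("speaker_id", "a")]])

def Spec_count_label_changes_py (original_segments : List (List (String × String))) (filtered_segments : List (List (String × String))) (out : Int) : Prop := out = count_label_changes_py_alt original_segments filtered_segments
instance (original_segments : List (List (String × String))) (filtered_segments : List (List (String × String))) (out : Int) : Decidable (Spec_count_label_changes_py original_segments filtered_segments out) := by unfold Spec_count_label_changes_py; infer_instance

-- ===== CLAIM (what is proved, stated in full; the proofs are below) =====
def Claim_equal_count_label_changes_py : Prop := ∀ (original_segments : List (List (String × String))) (filtered_segments : List (List (String × String))), Dom_count_label_changes_py original_segments filtered_segments → Pre_count_label_changes_py original_segments filtered_segments → Spec_count_label_changes_py original_segments filtered_segments (count_label_changes_py original_segments filtered_segments)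

-- ===== LEMMAS AND PROOFS =====

-- the merge of two sorted lists counts the size of the multiset intersection
theorem pvMerge_eq_card_inter (a b : List String)
    (ha : a.Pairwise (· ≤ ·)) (hb : b.Pairwise (· ≤ ·)) :
    pvMerge a b = (((a : Multiset String) ∩ (b : Multiset String)).card : Int) := by
  induction a, b using pvMerge.induct with
  | case1 b => simp [pvMerge]
  | case2 x xs => simp [pvMerge]
  | case3 xs y ys ih =>
      rw [pvMerge]
      simp only [if_pos]
      rw [ih ha.tail hb.tail]
      have : ((y :: xs : List String) : Multiset String) ∩ ((y :: ys : List String) : Multiset String)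
          = y ::ₘ (((xs : Multiset String) ∩ (ys : Multiset String))) := by
        rw [← Multiset.cons_coe y xs, ← Multiset.cons_coe y ys,
          Multiset.cons_inter_of_pos _ (Multiset.mem_cons_self y _),
          Multiset.erase_cons_head]
      rw [this]
      simp [add_comm]
  | case4 x xs y ys hne hlt ih =>
      rw [pvMerge]
      simp only [if_neg hne, if_pos hlt]
      rw [ih ha.tail hb]
      have hnot : x ∉ ((y :: ys : List String) : Multiset String) := by
        rw [Multiset.mem_coe]
        intro hmem
        rcases List.mem_cons.mp hmem with h | h
        · exact hne h
        · exact absurd ((List.pairwise_cons.mp hb).1 x h) (not_le.mpr hlt)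
      have : ((x :: xs : List String) : Multiset String) ∩ ((y :: ys : List String) : Multiset String)
          = ((xs : Multiset String) ∩ ((y :: ys : List String) : Multiset String)) := by
        rw [← Multiset.cons_coe x xs]
        exact Multiset.cons_inter_of_neg _ hnot
      rw [this]
  | case5 x xs y ys hne hnlt ih =>
      rw [pvMerge]
      simp only [if_neg hne, if_neg hnlt]
      rw [ih ha hb.tail]
      have hylt : y < x := lt_of_le_of_ne (not_lt.mp hnlt) (fun h => hne h.symm)
      have hnot : y ∉ ((x :: xs : List String) : Multiset String) := by
        rw [Multiset.mem_coe]
        intro hmem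
        rcases List.mem_cons.mp hmem with h | h
        · exact hne h.symm
        · exact absurd ((List.pairwise_cons.mp ha).1 y h) (not_le.mpr hylt)
      have : ((x :: xs : List String) : Multiset String) ∩ ((y :: ys : List String) : Multiset String)
          = ((x :: xs : List String) : Multiset String) ∩ ((ys : Multiset String)) := by
        rw [Multiset.inter_comm, ← Multiset.cons_coe y ys,
          Multiset.cons_inter_of_neg _ hnot, Multiset.inter_comm]
      rw [this]

-- a sum of counts over a nodup list containing every element of l is l.length
theorem sum_count_over_superset (K l : List String) (hnd : K.Nodup)
    (hsub : ∀ x ∈ l, x ∈ K) :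
    ((K.map (fun k => (l.count k : Int))).sum) = (l.length : Int) := by
  rw [← List.sum_toFinset _ hnd]
  have hS : ((l : Multiset String)).toFinset ⊆ K.toFinset := by
    intro x hx
    rw [Multiset.mem_toFinset, Multiset.mem_coe] at hx
    rw [List.mem_toFinset]
    exact hsub x hx
  have := Multiset.toFinset_sum_count_eq ((l : Multiset String))
  rw [Finset.sum_subset hS] at this
  · rw [show ((l : Multiset String)).card = l.length from rfl] at this
    calc ∑ k ∈ K.toFinset, (l.count k : Int)
        = ((∑ k ∈ K.toFinset, Multiset.count k ((l : Multiset String)) : ℕ) : Int) := by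
          push_cast
          refine Finset.sum_congr rfl fun k _ => ?_
          rw [Multiset.coe_count]
      _ = (l.length : Int) := by rw [this]
  · intro x _ hx
    rw [Multiset.mem_toFinset, Multiset.mem_coe] at hx
    exact Multiset.count_eq_zero.mpr hx

-- a sum of min-counts over such a list is the multiset-intersection size
theorem sum_min_over_superset (K l m : List String) (hnd : K.Nodup)
    (hsub : ∀ x ∈ l, x ∈ K) :
    ((K.map (fun k => (min (l.count k) (m.count k) : Int))).sum)
      = ((((l : Multiset String) ∩ (m : Multiset String)).card : Int)) := by
  rw [← List.sum_toFinset _ hnd]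
  set s := (l : Multiset String) ∩ (m : Multiset String) with hs
  have hS : s.toFinset ⊆ K.toFinset := by
    intro x hx
    rw [Multiset.mem_toFinset] at hx
    have : x ∈ (l : Multiset String) := Multiset.mem_of_le Multiset.inter_le_left hx
    rw [List.mem_toFinset]
    exact hsub x (Multiset.mem_coe.mp this)
  have := Multiset.toFinset_sum_count_eq s
  rw [Finset.sum_subset hS] at this
  · calc ∑ k ∈ K.toFinset, (min (l.count k) (m.count k) : Int)
        = ((∑ k ∈ K.toFinset, Multiset.count k s : ℕ) : Int) := by
          push_cast
          refine Finset.sum_congr rfl fun k _ => ?_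
          rw [hs, Multiset.count_inter]
          push_cast
          rw [Multiset.coe_count, Multiset.coe_count]
      _ = (s.card : Int) := by rw [this]
  · intro x _ hx
    rw [Multiset.mem_toFinset] at hx
    exact Multiset.count_eq_zero.mpr hx

theorem main_eq (o f : List (List (String × String))) :
    count_label_changes_py o f = count_label_changes_py_alt o f := by
  simp only [count_label_changes_py, count_label_changes_py_alt]
  set os := o.map (fun seg => pvSid seg) with hos
  set fs := f.map (fun seg => pvSid seg) with hfs
  -- A as a sum over its (nodup) key list K
  set K := PySem.Set.update (PySem.Set.ofList os) (PySem.Set.ofList fs) with hK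
  have hA : (PySem.Set.union (PySem.Set.ofList (PySem.Dict.counter os).keys)
        (PySem.Set.ofList (PySem.Dict.counter fs).keys)).foldl
        (fun changes speaker =>
          changes + |(PySem.Dict.counter os).getD speaker 0 - (PySem.Dict.counter fs).getD speaker 0|) 0
      = (K.map (fun k => |(os.count k : Int) - (fs.count k : Int)|)).sum := by
    rw [PySem.List.foldl_add]
    simp only [PySem.Dict.keys_counter, PySem.Dict.getD_counter,
      PySem.Set.ofList_eq_self_of_nodup _ (PySem.Set.nodup_ofList os),
      PySem.Set.ofList_eq_self_of_nodup _ (PySem.Set.nodup_ofList fs)]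
    rw [zero_add]
    rfl
  rw [hA]
  have hndK : K.Nodup := PySem.Set.nodup_update _ _ (PySem.Set.nodup_ofList os)
  have hsubo : ∀ x ∈ os, x ∈ K := fun x hx => by
    rw [hK, PySem.Set.mem_update]; exact Or.inl ((PySem.Set.mem_ofList os x).mpr hx)
  have hsubf : ∀ x ∈ fs, x ∈ K := fun x hx => by
    rw [hK, PySem.Set.mem_update]; exact Or.inr ((PySem.Set.mem_ofList fs x).mpr hx)
  -- B: the sorted lists are permutations, so lengths and multisets are those of os/fs
  have hpa := PySem.List.sorted_perm os (fun x => x) false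
  have hpb := PySem.List.sorted_perm fs (fun x => x) false
  have hma : ((PySem.List.sorted os (fun x => x) false : List String) : Multiset String) = (os : Multiset String) :=
    Multiset.coe_eq_coe.mpr hpa
  have hmb : ((PySem.List.sorted fs (fun x => x) false : List String) : Multiset String) = (fs : Multiset String) :=
    Multiset.coe_eq_coe.mpr hpb
  rw [pvMerge_eq_card_inter _ _ (PySem.List.sorted_pairwise os (fun x => x))
      (PySem.List.sorted_pairwise fs (fun x => x)), hma, hmb,
    hpa.length_eq, hpb.length_eq]
  -- reduce both sides to sums over K
  rw [← sum_min_over_superset K os fs hndK hsubo,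
    ← sum_count_over_superset K os hndK hsubo,
    ← sum_count_over_superset K fs hndK hsubf]
  -- pointwise: |c - f| = c + f - 2 * min c f
  induction K with
  | nil => simp
  | cons k ks ih =>
      simp only [List.map_cons, List.sum_cons]
      rw [ih]
      have : |(os.count k : Int) - (fs.count k : Int)|
          = (os.count k : Int) + (fs.count k : Int) - 2 * min (os.count k : Int) (fs.count k : Int) := by
        rcases le_total ((os.count k : Int)) ((fs.count k : Int)) with h | h
        · rw [min_eq_left h, abs_of_nonpos (by omega)]; ring
        · rw [min_eq_right h, abs_of_nonneg (by omega)]; ring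
      rw [this]
      ring

-- ===== VERDICT (by name: the statement is the Claim_ definition above) =====
theorem count_label_changes_py_spec : Claim_equal_count_label_changes_py := by
  intro o f _ _
  unfold Spec_count_label_changes_py
  exact main_eq o f
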